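-- pv_equiv track=rewrite | github.com/lorekeeper1412/lore | pg (1).py | count_trailing_digits
-- ===== SOURCE A (Python) =====
-- def count_trailing_digits(s: str) -> int:
--     c = 0
--     for ch in reversed(s):
--         if ch.isdigit():
--             c += 1
--         else:
--             break
--     return c
-- ===== SOURCE B (Python) =====
-- def count_trailing_digits(s: str) -> int:
--     # Forward single pass: remember the index of the last non-digit character.
--     last_non_digit = -1
--     for i, ch in enumerate(s):
--         if not ch.isdigit():
--             last_non_digit = i
--     return len(s) - 1 - last_non_digit
-- ===== Notes on version B (the rewrite author's own statement) =====
-- stated objective: alternative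
-- what changed: Replaces A's reverse scan with early break by a forward full-pass fold that records the index of the last non-digit and returns len(s)-1-that index.
import Mathlib
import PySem

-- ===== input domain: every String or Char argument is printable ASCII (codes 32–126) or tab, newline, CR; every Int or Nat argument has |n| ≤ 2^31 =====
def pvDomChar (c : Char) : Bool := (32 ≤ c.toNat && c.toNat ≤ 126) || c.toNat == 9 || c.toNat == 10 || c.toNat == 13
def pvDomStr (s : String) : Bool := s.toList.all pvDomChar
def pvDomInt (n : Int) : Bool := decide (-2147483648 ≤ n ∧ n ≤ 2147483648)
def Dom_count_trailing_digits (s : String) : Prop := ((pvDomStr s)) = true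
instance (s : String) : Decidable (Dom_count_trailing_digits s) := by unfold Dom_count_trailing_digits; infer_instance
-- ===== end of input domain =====

-- B replaces A's reverse scan with an early break by a forward full pass that
-- records the index of the last non-digit character (objective: alternative).

-- ===== PORT A =====
-- A: c = 0; for ch in reversed(s): if ch.isdigit(): c += 1 else: break; return c
def ctdLoopA : List Char → Int
  | [] => 0
  | ch :: rest => if PySem.Chars.isdigit ch then ctdLoopA rest + 1 else 0

def count_trailing_digits (s : String) : Int :=
  ctdLoopA s.toList.reverse

-- ===== PORT B =====
-- B: last_non_digit = -1; for i, ch in enumerate(s): if not ch.isdigit(): last_non_digit = i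
--    return len(s) - 1 - last_non_digit
def count_trailing_digits_alt (s : String) : Int :=
  let last := (PySem.List.enumerate s.toList).foldl
    (fun acc p => if PySem.Chars.isdigit p.2 then acc else p.1) (-1 : Int)
  (s.toList.length : Int) - 1 - last

-- ===== PRECONDITION & SPEC =====
def Spec_count_trailing_digits (s : String) (out : Int) : Prop := out = count_trailing_digits_alt s
instance (s : String) (out : Int) : Decidable (Spec_count_trailing_digits s out) := by unfold Spec_count_trailing_digits; infer_instance

-- ===== CLAIM (what is proved, stated in full; the proofs are below) =====
def Claim_equal_count_trailing_digits : Prop := ∀ (s : String), Dom_count_trailing_digits s → Spec_count_trailing_digits s (count_trailing_digits s)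

-- ===== LEMMAS AND PROOFS =====

theorem ctd_list_eq (l : List Char) :
    (l.length : Int) - 1 -
      (PySem.List.enumerate l).foldl
        (fun acc p => if PySem.Chars.isdigit p.2 then acc else p.1) (-1 : Int)
    = ctdLoopA l.reverse := by
  induction l using List.reverseRecOn with
  | nil => simp [PySem.List.enumerate, ctdLoopA]
  | append_singleton l c ih =>
    rw [PySem.List.enumerate_append]
    simp only [List.foldl_append, PySem.List.enumerate_cons, PySem.List.enumerate_nil,
      List.foldl_cons, List.foldl_nil, List.reverse_append, List.reverse_cons,
      List.reverse_nil, List.nil_append, List.singleton_append, List.length_append,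
      List.length_cons, List.length_nil]
    by_cases h : PySem.Chars.isdigit c
    · simp only [h, if_pos, ctdLoopA, ← ih]
      push_cast
      ring
    · simp only [h, ctdLoopA, Bool.false_eq_true, if_false]
      push_cast
      ring

-- ===== VERDICT (by name: the statement is the Claim_ definition above) =====
theorem count_trailing_digits_spec : Claim_equal_count_trailing_digits := by
  intro s _
  unfold Spec_count_trailing_digits count_trailing_digits count_trailing_digits_alt
  exact (ctd_list_eq s.toList).symm
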